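-- pv_equiv track=rewrite | github.com/mateobaricevic/advent-of-code | 2025/day_07.py | part_2
-- ===== SOURCE A (Python) =====
-- from collections import defaultdict
-- from math import floor
--
-- def part_2(diagram: list):
--     def simulate(start):
--         current = defaultdict(int)
--         current[start] = 1
--         total_exited = 0
--         while current:
--             new = defaultdict(int)
--             for (row, column), count in current.items():
--                 if row + 1 == len(diagram):
--                     total_exited += count
--                     continue
--                 if diagram[row + 1][column] in [".", "S"]:
--                     new[(row + 1, column)] += count
--                 elif diagram[row + 1][column] == "^":
--                     new[(row + 1, column - 1)] += count
--                     new[(row + 1, column + 1)] += count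
--                 else:
--                     total_exited += count
--             current = new
--         return total_exited
--
--     return simulate((0, floor(len(diagram[0]) / 2)))
-- ===== SOURCE B (Python) =====
-- from functools import lru_cache
-- from math import floor
--
-- def part_2(diagram: list):
--     @lru_cache(maxsize=None)
--     def exits(row, column):
--         if row + 1 == len(diagram):
--             return 1
--         cell = diagram[row + 1][column]
--         if cell in (".", "S"):
--             return exits(row + 1, column)
--         if cell == "^":
--             return exits(row + 1, column - 1) + exits(row + 1, column + 1)
--         return 1
--
--     return exits(0, floor(len(diagram[0]) / 2))
-- ===== Notes on version B (the rewrite author's own statement) =====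
-- stated objective: alternative
-- what changed: Replaced the iterative frontier simulation (a dict of particle counts rebuilt row by row) with a top-down memoized recursion exits(row,col) giving the number of exit events of one particle.
import Mathlib
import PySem

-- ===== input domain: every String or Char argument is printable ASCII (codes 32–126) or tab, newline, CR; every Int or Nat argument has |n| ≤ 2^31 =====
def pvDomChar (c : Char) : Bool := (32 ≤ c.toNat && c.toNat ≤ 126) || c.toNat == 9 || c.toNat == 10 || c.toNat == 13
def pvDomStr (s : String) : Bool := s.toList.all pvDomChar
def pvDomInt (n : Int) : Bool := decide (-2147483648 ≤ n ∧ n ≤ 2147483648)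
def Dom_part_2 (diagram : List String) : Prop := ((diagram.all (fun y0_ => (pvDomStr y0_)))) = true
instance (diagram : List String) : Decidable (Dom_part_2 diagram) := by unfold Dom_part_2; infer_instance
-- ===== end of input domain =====

-- B replaces A's iterative frontier simulation (a dict of particle counts rebuilt row by row)
-- with a top-down memoized recursion over cells; same return value on every input on which A returns.

-- ===== PORT A =====
-- one body of A's inner `for (row, column), count in current.items()` loop
def aStep (diagram : List String) (st : PySem.Dict (Int × Int) Int × Int)
    (item : (Int × Int) × Int) : PySem.Dict (Int × Int) Int × Int :=
  let row := item.1.1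
  let col := item.1.2
  let count := item.2
  let new := st.1
  let tot := st.2
  if row + 1 = (diagram.length : Int) then (new, tot + count)
  else
    match PySem.List.pyGet? diagram (row + 1) with
    | none => (new, tot)            -- Python IndexError; unreachable (row+1 < len here)
    | some s =>
      match PySem.Str.pyGet? s col with
      | none => (new, tot)          -- Python IndexError; excluded by Pre_part_2
      | some c =>
        if c = '.' ∨ c = 'S' then (new.modify (row + 1, col) 0 (· + count), tot)
        else if c = '^' then
          (((new.modify (row + 1, col - 1) 0 (· + count)).modify (row + 1, col + 1) 0 (· + count)), tot)
        else (new, tot + count)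

-- A's `while current:` loop; fuel is only a totality guard (rows strictly increase each pass)
def aLoop (diagram : List String) : Nat → PySem.Dict (Int × Int) Int → Int → Int
  | 0, _, total => total
  | fuel + 1, current, total =>
    if current.items.isEmpty then total
    else
      let res := current.items.foldl (aStep diagram) (PySem.Dict.empty, total)
      aLoop diagram fuel res.1 res.2

def part_2 (diagram : List String) : Int :=
  match diagram with
  | [] => 0                         -- Python IndexError on diagram[0]; excluded by Pre_part_2
  | s :: _ =>
    aLoop diagram (diagram.length + 1)
      (PySem.Dict.empty.insert (0, PySem.Int.floordiv (PySem.Str.len s) 2) 1) 0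

-- ===== PORT B =====
-- Source B's memoized `exits(row, column)`; memoization is value-transparent, ported as plain recursion
def bGo (diagram : List String) (row : Nat) (col : Int) : Int :=
  if row + 1 = diagram.length then 1
  else if h : row + 1 < diagram.length then
    match PySem.Str.pyGet? diagram[row + 1] col with
    | none => 0                     -- Python IndexError; excluded by Pre_part_2
    | some c =>
      if c = '.' ∨ c = 'S' then bGo diagram (row + 1) col
      else if c = '^' then bGo diagram (row + 1) (col - 1) + bGo diagram (row + 1) (col + 1)
      else 1
  else 0                            -- unreachable from row 0 (rows only grow to diagram.length)
termination_by diagram.length - row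
decreasing_by all_goals omega

def part_2_alt (diagram : List String) : Int :=
  match diagram with
  | [] => 0                         -- Python IndexError on diagram[0]; excluded by Pre_part_2
  | s :: _ => bGo diagram 0 (PySem.Int.floordiv (PySem.Str.len s) 2)

-- ===== PRECONDITION & SPEC =====
-- the columns reached on the next row by particles at columns `cols`, reading row string s;
-- none = some read is out of range (Python IndexError)
def pvNext (s : String) : List Int → Option (List Int)
  | [] => some []
  | c :: t =>
    match pvNext s t with
    | none => none
    | some l =>
      match PySem.Str.pyGet? s c with
      | none => none
      | some ch =>
        if ch = '.' ∨ ch = 'S' then some (c :: l)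
        else if ch = '^' then some ((c - 1) :: (c + 1) :: l)
        else some l

-- all reads performed while flowing through the remaining rows are in range
def pvSafeAux : List String → List Int → Bool
  | [], _ => true
  | s :: rest, cols =>
    match pvNext s cols with
    | none => false
    | some cols' => pvSafeAux rest cols'

-- Pre_ excludes exactly the inputs on which A raises IndexError: the empty diagram, and diagrams
-- in which some read diagram[row+1][column] of a reachable particle position is out of range
-- (B performs exactly the same reads and raises there too); on every other input A returns a value.
def Pre_part_2 (diagram : List String) : Prop :=
  diagram ≠ [] ∧ pvSafeAux diagram.tail [((diagram.headD "").toList.length / 2 : Nat)] = true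
instance (diagram : List String) : Decidable (Pre_part_2 diagram) := by unfold Pre_part_2; infer_instance

def pvWitness_part_2 : List String := ["^..", ".^.", "..."]

def Spec_part_2 (diagram : List String) (out : Int) : Prop := out = part_2_alt diagram
instance (diagram : List String) (out : Int) : Decidable (Spec_part_2 diagram out) := by unfold Spec_part_2; infer_instance

-- ===== CLAIM (what is proved, stated in full; the proofs are below) =====
def Claim_equal_part_2 : Prop := ∀ (diagram : List String), Dom_part_2 diagram → Pre_part_2 diagram → Spec_part_2 diagram (part_2 diagram)

-- ===== LEMMAS AND PROOFS =====

-- exit count of one particle at key k, A's keys being (row, col) with row always a Nat cast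
def pvF (diagram : List String) (k : Int × Int) : Int := bGo diagram k.1.toNat k.2

-- weighted sum of exit counts over a frontier dict
def pvWsum (diagram : List String) (d : PySem.Dict (Int × Int) Int) : Int :=
  (d.keys.map (fun k => d.getD k 0 * pvF diagram k)).sum

theorem pvSum_map_ite (k : Int × Int) (g : Int × Int → Int) (e : Int) :
    ∀ l : List (Int × Int), l.Nodup → k ∈ l →
    (l.map (fun j => (if j = k then g j + e else g j))).sum = (l.map g).sum + e := by
  intro l
  induction l with
  | nil => intro _ hk; cases hk
  | cons a t ih =>
    intro hnd hk
    by_cases hak : a = k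
    · subst hak
      have hnt : a ∉ t := (List.nodup_cons.mp hnd).1
      have hcg : ∀ j ∈ t, (if j = a then g j + e else g j) = g j := by
        intro j hj
        have : j ≠ a := by intro h; subst h; exact hnt hj
        simp [this]
      rw [List.map_cons, List.map_cons, List.sum_cons, List.sum_cons,
        List.map_congr_left hcg, if_pos rfl]
      ring
    · have hkt : k ∈ t := by
        rcases List.mem_cons.mp hk with h | h
        · exact absurd h.symm hak
        · exact h
      have hne : a ≠ k := hak
      simp only [List.map_cons, List.sum_cons, if_neg hne, ih (List.nodup_cons.mp hnd).2 hkt]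
      ring

theorem pvNodup_keys_modify (d : PySem.Dict (Int × Int) Int) (k : Int × Int) (c : Int)
    (hnd : d.keys.Nodup) : (d.modify k 0 (· + c)).keys.Nodup := by
  rw [PySem.Dict.keys_modify]
  exact PySem.Dict.nodup_keys_insert _ _ _ hnd

theorem pvMem_keys_modify (d : PySem.Dict (Int × Int) Int) (k j : Int × Int) (c : Int)
    (hj : j ∈ (d.modify k 0 (· + c)).keys) : j = k ∨ j ∈ d.keys := by
  rw [PySem.Dict.keys_modify] at hj
  exact (PySem.Dict.mem_keys_insert _ _ _ _).mp hj

theorem pvWsum_modify (diagram : List String) (d : PySem.Dict (Int × Int) Int)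
    (k : Int × Int) (c : Int) (hnd : d.keys.Nodup) :
    pvWsum diagram (d.modify k 0 (· + c)) = pvWsum diagram d + c * pvF diagram k := by
  unfold pvWsum
  by_cases hc : d.contains k = true
  · have hkmem : k ∈ d.keys := (PySem.Dict.contains_iff_mem_keys d k).mp hc
    have hkeys : (d.modify k 0 (· + c)).keys = d.keys := by
      rw [PySem.Dict.keys_modify, PySem.Dict.keys_insert_of_contains _ _ hc]
    rw [hkeys]
    have hpt : ∀ j ∈ d.keys,
        (d.modify k 0 (· + c)).getD j 0 * pvF diagram j
          = (if j = k then d.getD j 0 * pvF diagram j + c * pvF diagram k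
             else d.getD j 0 * pvF diagram j) := by
      intro j hj
      rw [PySem.Dict.getD_modify]
      split_ifs with h
      · subst h; ring
      · rfl
    rw [List.map_congr_left hpt]
    exact pvSum_map_ite k _ _ d.keys hnd hkmem
  · have hc' : d.contains k = false := by revert hc; cases d.contains k <;> simp
    have hkeys : (d.modify k 0 (· + c)).keys = d.keys ++ [k] := by
      rw [PySem.Dict.keys_modify, PySem.Dict.keys_insert_of_not_contains _ _ hc']
    rw [hkeys, List.map_append, List.sum_append]
    have hkmem : k ∉ d.keys := by
      intro h
      rw [(PySem.Dict.contains_iff_mem_keys d k).mpr h] at hc'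
      cases hc'
    have hpt : ∀ j ∈ d.keys,
        (d.modify k 0 (· + c)).getD j 0 * pvF diagram j = d.getD j 0 * pvF diagram j := by
      intro j hj
      rw [PySem.Dict.getD_modify, if_neg (by intro h; subst h; exact hkmem hj)]
    rw [List.map_congr_left hpt]
    simp [PySem.Dict.getD_modify, PySem.Dict.getD_of_not_contains d 0 hc']

-- membership facts delivered by a successful pvNext: each particle's read succeeds and
-- its children columns are in the next reach list
theorem pvNext_mem (s : String) :
    ∀ (cols cols' : List Int), pvNext s cols = some cols' → ∀ c ∈ cols,
    ∃ ch, PySem.Str.pyGet? s c = some ch ∧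
      ((ch = '.' ∨ ch = 'S') → c ∈ cols') ∧
      (ch = '^' → (c - 1 ∈ cols' ∧ c + 1 ∈ cols')) := by
  intro cols
  induction cols with
  | nil => intro _ _ c hc; cases hc
  | cons a t ih =>
    intro cols' hnx c hc
    rw [pvNext] at hnx
    cases hrec : pvNext s t with
    | none => rw [hrec] at hnx; cases hnx
    | some l =>
      rw [hrec] at hnx
      cases hget : PySem.Str.pyGet? s a with
      | none => rw [hget] at hnx; cases hnx
      | some ch =>
        rw [hget] at hnx
        dsimp only at hnx
        have hsub : ∀ x : Int, x ∈ l → x ∈ cols' := by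
          intro x hx
          split_ifs at hnx with h1 h2 <;>
            (cases hnx; simp [hx])
        rcases List.mem_cons.mp hc with hca | hct
        · subst hca
          refine ⟨ch, hget, ?_, ?_⟩
          · intro hd
            rw [if_pos hd] at hnx
            cases hnx; simp
          · intro hcar
            have hnd : ¬ (ch = '.' ∨ ch = 'S') := by
              intro h; rcases h with h | h <;> simp [h] at hcar
            rw [if_neg hnd, if_pos hcar] at hnx
            cases hnx
            constructor <;> simp
        · obtain ⟨ch', hg', h1, h2⟩ := ih l hrec c hct
          exact ⟨ch', hg', fun hd => hsub _ (h1 hd), fun hcar =>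
            ⟨hsub _ (h2 hcar).1, hsub _ (h2 hcar).2⟩⟩

theorem pvWsum_empty (diagram : List String) : pvWsum diagram PySem.Dict.empty = 0 := by
  simp [pvWsum, PySem.Dict.keys_empty]

theorem pvWsum_items (diagram : List String) (d : PySem.Dict (Int × Int) Int)
    (hnd : d.keys.Nodup) :
    (d.items.map (fun p => p.2 * pvF diagram p.1)).sum = pvWsum diagram d := by
  rw [PySem.Dict.items_eq_map_keys d hnd 0, List.map_map]
  rfl

theorem pvBGo_exit (diagram : List String) (r : Nat) (col : Int) (h : r + 1 = diagram.length) :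
    bGo diagram r col = 1 := by
  rw [bGo, if_pos h]

theorem pvBGo_step (diagram : List String) (r : Nat) (col : Int) (c : Char)
    (hrlt : r + 1 < diagram.length)
    (hc : PySem.Str.pyGet? (diagram[r + 1]'hrlt) col = some c) :
    bGo diagram r col =
      if c = '.' ∨ c = 'S' then bGo diagram (r + 1) col
      else if c = '^' then bGo diagram (r + 1) (col - 1) + bGo diagram (r + 1) (col + 1)
      else 1 := by
  rw [bGo, if_neg (by omega), dif_pos hrlt, hc]

-- the invariant carried per frontier key at row r: the key sits at row r, within the reach list
def pvKeyOK (diagram : List String) (r : Nat) (cols : List Int) (k : Int × Int) : Prop :=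
  k.1 = (r : Int) ∧ k.2 ∈ cols ∧ r < diagram.length

theorem pvFold_eq (diagram : List String) (r : Nat) (cols cols' : List Int)
    (hnx : ∀ h : r + 1 < diagram.length, pvNext (diagram[r + 1]'h) cols = some cols') :
    ∀ (items : List ((Int × Int) × Int)) (new : PySem.Dict (Int × Int) Int) (tot : Int),
    (∀ p ∈ items, pvKeyOK diagram r cols p.1) →
    new.keys.Nodup →
    (∀ k ∈ new.keys, pvKeyOK diagram (r + 1) cols' k) →
    (items.foldl (aStep diagram) (new, tot)).2
        + pvWsum diagram (items.foldl (aStep diagram) (new, tot)).1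
      = tot + pvWsum diagram new + (items.map (fun p => p.2 * pvF diagram p.1)).sum
    ∧ (items.foldl (aStep diagram) (new, tot)).1.keys.Nodup
    ∧ (∀ k ∈ (items.foldl (aStep diagram) (new, tot)).1.keys, pvKeyOK diagram (r + 1) cols' k) := by
  intro items
  induction items with
  | nil =>
    intro new tot _ hnd hkeys
    exact ⟨by simp, hnd, hkeys⟩
  | cons p rest ih =>
    intro new tot hitems hnd hkeys
    rcases p with ⟨⟨row, col⟩, count⟩
    obtain ⟨hrow, hcin, hrlen⟩ := hitems _ (List.mem_cons_self)
    simp only at hrow hcin hrlen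
    subst hrow
    rw [List.foldl_cons]
    have hrest : ∀ q ∈ rest, pvKeyOK diagram r cols q.1 :=
      fun q hq => hitems q (List.mem_cons_of_mem _ hq)
    simp only [List.map_cons, List.sum_cons]
    by_cases hx : (r : Int) + 1 = (diagram.length : Int)
    · have hstep : aStep diagram (new, tot) (((r : Int), col), count) = (new, tot + count) := by
        simp only [aStep]
        rw [if_pos hx]
      rw [hstep]
      obtain ⟨h1, h2, h3⟩ := ih new (tot + count) hrest hnd hkeys
      refine ⟨?_, h2, h3⟩
      rw [h1]
      have hF : pvF diagram ((r : Int), col) = 1 := by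
        unfold pvF
        simp only [Int.toNat_natCast]
        exact pvBGo_exit diagram r col (by omega)
      rw [hF]
      ring
    · have hrlt : r + 1 < diagram.length := by omega
      have hget : PySem.List.pyGet? diagram ((r : Int) + 1) = some (diagram[r + 1]'hrlt) := by
        have hcast : ((r : Int) + 1) = ((r + 1 : Nat) : Int) := by push_cast; ring
        rw [hcast, PySem.List.pyGet?_natCast]
        exact List.getElem?_eq_getElem hrlt
      obtain ⟨c, hcS, hmemD, hmemC⟩ := pvNext_mem (diagram[r + 1]'hrlt) cols cols' (hnx hrlt) col hcin
      have hstep : aStep diagram (new, tot) (((r : Int), col), count) =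
          (if c = '.' ∨ c = 'S' then (new.modify ((r : Int) + 1, col) 0 (· + count), tot)
           else if c = '^' then
             (((new.modify ((r : Int) + 1, col - 1) 0 (· + count)).modify ((r : Int) + 1, col + 1) 0 (· + count)), tot)
           else (new, tot + count)) := by
        simp only [aStep, hget, hcS]
        rw [if_neg hx]
      have hF0 : ((r : Int) + 1).toNat = r + 1 := by omega
      have hF1 : ∀ d : Int, pvF diagram ((r : Int) + 1, d) = bGo diagram (r + 1) d := by
        intro d
        unfold pvF
        rw [hF0]
      have hFr : pvF diagram ((r : Int), col) =
          (if c = '.' ∨ c = 'S' then bGo diagram (r + 1) col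
           else if c = '^' then bGo diagram (r + 1) (col - 1) + bGo diagram (r + 1) (col + 1)
           else 1) := by
        unfold pvF
        simp only [Int.toNat_natCast]
        exact pvBGo_step diagram r col c hrlt hcS
      by_cases hdot : c = '.' ∨ c = 'S'
      · rw [hstep, if_pos hdot]
        have hnd' := pvNodup_keys_modify new ((r : Int) + 1, col) count hnd
        have hkeys' : ∀ k ∈ (new.modify ((r : Int) + 1, col) 0 (· + count)).keys,
            pvKeyOK diagram (r + 1) cols' k := by
          intro k hk
          rcases pvMem_keys_modify new _ k count hk with h | h
          · subst h
            refine ⟨?_, hmemD hdot, hrlt⟩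
            show ((r : Int) + 1) = ((r + 1 : Nat) : Int)
            push_cast; ring
          · exact hkeys k h
        obtain ⟨h1, h2, h3⟩ := ih _ tot hrest hnd' hkeys'
        refine ⟨?_, h2, h3⟩
        rw [h1, pvWsum_modify diagram new _ count hnd, hF1, hFr, if_pos hdot]
        ring
      · by_cases hcar : c = '^'
        · rw [hstep, if_neg hdot, if_pos hcar]
          have hnd1 := pvNodup_keys_modify new ((r : Int) + 1, col - 1) count hnd
          have hnd2 := pvNodup_keys_modify _ ((r : Int) + 1, col + 1) count hnd1
          have hkeys2 : ∀ k ∈ ((new.modify ((r : Int) + 1, col - 1) 0 (· + count)).modify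
              ((r : Int) + 1, col + 1) 0 (· + count)).keys, pvKeyOK diagram (r + 1) cols' k := by
            intro k hk
            have hrow1 : ((r : Int) + 1) = ((r + 1 : Nat) : Int) := by push_cast; ring
            rcases pvMem_keys_modify _ _ k count hk with h | h
            · subst h
              exact ⟨hrow1, (hmemC hcar).2, hrlt⟩
            · rcases pvMem_keys_modify _ _ k count h with h' | h'
              · subst h'
                exact ⟨hrow1, (hmemC hcar).1, hrlt⟩
              · exact hkeys k h'
          obtain ⟨h1, h2, h3⟩ := ih _ tot hrest hnd2 hkeys2
          refine ⟨?_, h2, h3⟩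
          rw [h1, pvWsum_modify diagram _ _ count hnd1, pvWsum_modify diagram new _ count hnd,
            hF1, hF1, hFr, if_neg hdot, if_pos hcar]
          ring
        · rw [hstep, if_neg hdot, if_neg hcar]
          obtain ⟨h1, h2, h3⟩ := ih new (tot + count) hrest hnd hkeys
          refine ⟨?_, h2, h3⟩
          rw [h1, hFr, if_neg hdot, if_neg hcar]
          ring

theorem pvLoop_eq (diagram : List String) :
    ∀ (fuel r : Nat) (cols : List Int) (current : PySem.Dict (Int × Int) Int) (total : Int),
    diagram.length - r < fuel →
    pvSafeAux (diagram.drop (r + 1)) cols = true →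
    current.keys.Nodup →
    (∀ k ∈ current.keys, pvKeyOK diagram r cols k) →
    aLoop diagram fuel current total = total + pvWsum diagram current := by
  intro fuel
  induction fuel with
  | zero => intro r cols current total hf; omega
  | succ fuel ih =>
    intro r cols current total hf hsafe hnd hkeys
    rw [aLoop]
    by_cases he : current.items.isEmpty
    · rw [if_pos he]
      have hit : current.items = [] := List.isEmpty_iff.mp he
      have : pvWsum diagram current = 0 := by
        rw [← pvWsum_items diagram current hnd, hit]
        simp
      rw [this]; ring
    · rw [if_neg he]
      have hit : current.items ≠ [] := fun h => he (List.isEmpty_iff.mpr h)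
      have hitems : ∀ p ∈ current.items, pvKeyOK diagram r cols p.1 := by
        intro p hp
        exact hkeys p.1 (by simp only [PySem.Dict.keys]; exact List.mem_map_of_mem hp)
      have hr : r < diagram.length := by
        obtain ⟨p, hp⟩ := List.exists_mem_of_ne_nil _ hit
        exact (hitems p hp).2.2
      by_cases hx : r + 1 < diagram.length
      · have hdropc : diagram.drop (r + 1) = (diagram[r + 1]'hx) :: diagram.drop (r + 2) :=
          List.drop_eq_getElem_cons hx
        rw [hdropc, pvSafeAux] at hsafe
        cases hnxv : pvNext (diagram[r + 1]'hx) cols with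
        | none => rw [hnxv] at hsafe; cases hsafe
        | some cols' =>
          rw [hnxv] at hsafe
          obtain ⟨h1, h2, h3⟩ := pvFold_eq diagram r cols cols'
            (fun h => hnxv) current.items PySem.Dict.empty total hitems
            PySem.Dict.nodup_keys_empty (by simp [PySem.Dict.keys_empty])
          rw [ih (r + 1) cols' _ _ (by omega) hsafe h2 h3, h1, pvWsum_empty,
            pvWsum_items diagram current hnd]
          ring
      · -- r + 1 = diagram.length: every particle exits, the new frontier stays empty
        have hx1 : r + 1 = diagram.length := by omega
        obtain ⟨h1, h2, h3⟩ := pvFold_eq diagram r cols []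
          (fun h => absurd h (by omega)) current.items PySem.Dict.empty total hitems
          PySem.Dict.nodup_keys_empty (by simp [PySem.Dict.keys_empty])
        have hsafe' : pvSafeAux (diagram.drop (r + 2)) [] = true := by
          rw [List.drop_eq_nil_of_le (by omega)]
          rfl
        rw [ih (r + 1) [] _ _ (by omega) hsafe' h2 h3, h1, pvWsum_empty,
          pvWsum_items diagram current hnd]
        ring

theorem pvStrLen_cast (s : String) : PySem.Str.len s = (s.toList.length : Int) := by
  simp [pysem]

theorem pvMid_cast (s : String) :
    PySem.Int.floordiv (PySem.Str.len s) 2 = ((s.toList.length / 2 : Nat) : Int) := by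
  rw [pvStrLen_cast]
  exact_mod_cast PySem.Int.floordiv_natCast s.toList.length 2

-- ===== VERDICT (by name: the statement is the Claim_ definition above) =====
theorem part_2_spec : Claim_equal_part_2 := by
  intro diagram hDom hPre
  unfold Spec_part_2
  cases diagram with
  | nil => exact absurd rfl hPre.1
  | cons s rest =>
    simp only [part_2, part_2_alt]
    have hmidI := pvMid_cast s
    have hkeys0 : (PySem.Dict.empty.insert ((0 : Int), PySem.Int.floordiv (PySem.Str.len s) 2) (1 : Int)).keys
        = [((0 : Int), PySem.Int.floordiv (PySem.Str.len s) 2)] := by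
      rw [PySem.Dict.keys_insert_of_not_contains _ _ (PySem.Dict.contains_empty _),
        PySem.Dict.keys_empty]
      rfl
    have hsafe : pvSafeAux ((s :: rest).drop 1) [((s.toList.length / 2 : Nat) : Int)] = true := hPre.2
    rw [pvLoop_eq (s :: rest) ((s :: rest).length + 1) 0
      [((s.toList.length / 2 : Nat) : Int)] _ 0
      (by omega) hsafe
      (by rw [hkeys0]; exact List.nodup_singleton _)
      (by
        intro k hk
        rw [hkeys0, List.mem_singleton] at hk
        subst hk
        exact ⟨rfl, by rw [hmidI]; exact List.mem_singleton_self _, by simp⟩)]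
    unfold pvWsum
    rw [hkeys0]
    simp only [List.map_cons, List.map_nil, List.sum_cons, List.sum_nil,
      PySem.Dict.getD_insert_self]
    unfold pvF
    rw [hmidI]
    norm_num
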